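-- pv_equiv track=rewrite | github.com/mango606/baekjoon-hub | 백준/Gold/1339. 단어 수학/단어 수학.py | max_word_sum
-- ===== SOURCE A (Python) =====
-- def max_word_sum(words):
--     weight = {}
--     # 각 알파벳의 가중치 계산
--     for word in words:
--         length = len(word)
--         for i, char in enumerate(word):
--             if char in weight:
--                 weight[char] += 10 ** (length - i - 1)
--             else:
--                 weight[char] = 10 ** (length - i - 1)
--
--     # 가중치를 기준으로 정렬하고 숫자 할당
--     sorted_weight = sorted(weight.items(), key=lambda x: -x[1])
--     assign_number = 9
--     total_sum = 0
--     number_map = {}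
--
--     for char, _ in sorted_weight:
--         number_map[char] = assign_number
--         assign_number -= 1
--
--     # 숫자 할당 결과를 통해 최대 합 계산
--     for word in words:
--         current_sum = 0
--         length = len(word)
--         for i, char in enumerate(word):
--             current_sum += number_map[char] * 10 ** (length - i - 1)
--         total_sum += current_sum
--
--     return total_sum
-- ===== SOURCE B (Python) =====
-- def max_word_sum(words):
--     weight = {}
--     for word in words:
--         n = len(word)
--         for i, ch in enumerate(word):
--             weight[ch] = weight.get(ch, 0) + 10 ** (n - i - 1)
--     total = 0
--     for idx, (ch, w) in enumerate(sorted(weight.items(), key=lambda x: -x[1])):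
--         total += (9 - idx) * w
--     return total
-- ===== Notes on version B (the rewrite author's own statement) =====
-- stated objective: simpler
-- what changed: B builds the same per-letter weight dict but then computes the answer in one loop over the weights sorted by descending value, accumulating (9-index)*weight directly, eliminating A's digit-assignment dict and its entire second nested pass over all the words (measured constant-factor speedup from the removed pass).
import Mathlib
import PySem

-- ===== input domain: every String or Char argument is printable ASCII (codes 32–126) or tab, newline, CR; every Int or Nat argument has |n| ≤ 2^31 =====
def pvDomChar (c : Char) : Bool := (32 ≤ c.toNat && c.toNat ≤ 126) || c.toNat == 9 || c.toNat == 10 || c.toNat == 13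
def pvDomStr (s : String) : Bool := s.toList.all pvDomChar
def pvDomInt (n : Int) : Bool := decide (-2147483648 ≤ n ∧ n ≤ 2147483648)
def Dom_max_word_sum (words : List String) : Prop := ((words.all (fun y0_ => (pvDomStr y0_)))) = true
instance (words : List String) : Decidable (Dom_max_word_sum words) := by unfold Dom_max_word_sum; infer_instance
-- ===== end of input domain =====

-- B replaces A's digit-assignment dict and second nested pass over the words by a single
-- loop over the sorted weights accumulating (9 - index) * weight (objective: simpler).

-- ===== PORT A =====
-- positional weight of the i-th character of a word of length n: 10 ** (n - i - 1)
-- exact for the indices enumerate yields (0 ≤ i < n)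
def pvPow (n : Nat) (i : Int) : Int := (10 : Int) ^ (n - i.toNat - 1)

-- first nested loop of A: the weight dict ('+=' / '=' written as the contains test A performs)
def pvWeightA (words : List String) : PySem.Dict Char Int :=
  words.foldl (fun d w =>
    (PySem.List.enumerate w.toList).foldl (fun d p =>
      if d.contains p.2 then d.insert p.2 (d.getD p.2 0 + pvPow w.toList.length p.1)
      else d.insert p.2 (pvPow w.toList.length p.1)) d) PySem.Dict.empty

-- 'for char, _ in sorted_weight: number_map[char] = assign_number; assign_number -= 1'
def pvAssign : List (Char × Int) → PySem.Dict Char Int → Int → PySem.Dict Char Int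
  | [], m, _ => m
  | p :: rest, m, a => pvAssign rest (m.insert p.1 a) (a - 1)

def max_word_sum (words : List String) : Int :=
  let weight := pvWeightA words
  let sorted_weight := PySem.List.sorted weight.items (fun x => -x.2) false
  let number_map := pvAssign sorted_weight PySem.Dict.empty 9
  -- second pass: number_map[char] always succeeds (every char of words is a key), so getD 0 is exact
  words.foldl (fun total w =>
    total + (PySem.List.enumerate w.toList).foldl (fun s p =>
      s + number_map.getD p.2 0 * pvPow w.toList.length p.1) 0) 0

-- ===== PORT B =====
-- Source B's first loop: weight[ch] = weight.get(ch, 0) + 10 ** (n - i - 1)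
def pvWeightB (words : List String) : PySem.Dict Char Int :=
  words.foldl (fun d w =>
    (PySem.List.enumerate w.toList).foldl (fun d p =>
      d.insert p.2 (d.getD p.2 0 + pvPow w.toList.length p.1)) d) PySem.Dict.empty

def max_word_sum_alt (words : List String) : Int :=
  let weight := pvWeightB words
  (PySem.List.enumerate (PySem.List.sorted weight.items (fun x => -x.2) false)).foldl
    (fun total q => total + (9 - q.1) * q.2.2) 0

-- ===== PRECONDITION & SPEC =====
def Spec_max_word_sum (words : List String) (out : Int) : Prop := out = max_word_sum_alt words
instance (words : List String) (out : Int) : Decidable (Spec_max_word_sum words out) := by unfold Spec_max_word_sum; infer_instance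

-- ===== CLAIM (what is proved, stated in full; the proofs are below) =====
def Claim_equal_max_word_sum : Prop := ∀ (words : List String), Dom_max_word_sum words → Spec_max_word_sum words (max_word_sum words)

-- ===== LEMMAS AND PROOFS =====

-- sum of f(key) * value over an association list
def pvSumL (f : Char → Int) (l : List (Char × Int)) : Int :=
  (l.map (fun p => f p.1 * p.2)).sum

theorem pvSumL_perm (f : Char → Int) {l l' : List (Char × Int)} (h : l.Perm l') :
    pvSumL f l = pvSumL f l' :=
  List.Perm.sum_eq (h.map _)

theorem pvSumL_cons (f : Char → Int) (p : Char × Int) (t : List (Char × Int)) :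
    pvSumL f (p :: t) = f p.1 * p.2 + pvSumL f t := by
  simp [pvSumL]

-- replacing the unique entry (c, W) by (c, W + v) bumps the sum by f c * v
theorem pvSumL_replace (f : Char → Int) (c : Char) (v : Int) :
    ∀ (l : List (Char × Int)) (W : Int), (l.map (·.1)).Nodup → (c, W) ∈ l →
      pvSumL f (l.map (fun p => if p.1 == c then (c, W + v) else p)) = pvSumL f l + f c * v := by
  intro l
  induction l with
  | nil => intro W _ h; cases h
  | cons p t ih =>
    intro W hnd hmem
    simp only [List.map_cons, List.nodup_cons] at hnd
    obtain ⟨hp, hnt⟩ := hnd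
    by_cases hc : p.1 = c
    · have hWp : p = (c, W) := by
        rcases List.mem_cons.mp hmem with h | h
        · exact h.symm
        · exact absurd (List.mem_map.mpr ⟨(c, W), h, by simp⟩) (hc ▸ hp)
      have htid : t.map (fun p => if p.1 == c then (c, W + v) else p) = t := by
        conv_rhs => rw [← List.map_id t]
        apply List.map_congr_left
        intro q hq
        have hqc : q.1 ≠ c := fun h => hp (hc ▸ List.mem_map.mpr ⟨q, hq, h⟩)
        simp [hqc]
      have hrepl : (if (p.1 == c) = true then (c, W + v) else p) = (c, W + v) := by
        simp [hc]
      rw [List.map_cons, hrepl, htid, hWp, pvSumL_cons, pvSumL_cons]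
      ring
    · have hmem' : (c, W) ∈ t := by
        rcases List.mem_cons.mp hmem with h | h
        · exact absurd (congrArg Prod.fst h.symm) hc
        · exact h
      have hrepl : (if (p.1 == c) = true then (c, W + v) else p) = p := by
        simp [hc]
      rw [List.map_cons, hrepl, pvSumL_cons, pvSumL_cons, ih W hnt hmem']
      ring

-- the Python update weight[c] = weight.get(c, 0) + v bumps the item sum by f c * v
theorem pvSumL_bump (f : Char → Int) (d : PySem.Dict Char Int) (c : Char) (v : Int)
    (h : d.keys.Nodup) :
    pvSumL f (d.insert c (d.getD c 0 + v)).items = pvSumL f d.items + f c * v := by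
  have hk : (d.items.map (·.1)).Nodup := by
    simpa only [PySem.Dict.keys] using h
  by_cases hc : d.contains c = true
  · obtain ⟨w, hw⟩ : ∃ w, d.get? c = some w := by
      rw [PySem.Dict.contains_eq_isSome_get?] at hc
      exact Option.isSome_iff_exists.mp hc
    have hmem := PySem.Dict.mem_items_of_get?_eq_some d hw
    have hgd : d.getD c 0 = w := by rw [PySem.Dict.getD_eq_get?_getD, hw]; rfl
    rw [PySem.Dict.items_insert_of_contains d _ hc, hgd]
    exact pvSumL_replace f c v d.items w hk hmem
  · have hcf : d.contains c = false := by simpa using hc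
    rw [PySem.Dict.items_insert_of_not_contains d _ hcf,
        PySem.Dict.getD_of_not_contains d 0 hcf]
    simp [pvSumL]

-- the per-word weight-building loop, over an arbitrary enumerated list
theorem pvSumL_word (f : Char → Int) (g : Int → Int) :
    ∀ (ps : List (Int × Char)) (d : PySem.Dict Char Int), d.keys.Nodup →
      pvSumL f ((ps.foldl (fun d p => d.insert p.2 (d.getD p.2 0 + g p.1)) d).items)
        = pvSumL f d.items + (ps.map (fun p => f p.2 * g p.1)).sum := by
  intro ps
  induction ps with
  | nil => intro d _; simp
  | cons p t ih =>
    intro d hd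
    simp only [List.foldl_cons, List.map_cons, List.sum_cons]
    rw [ih _ (PySem.Dict.nodup_keys_insert d _ _ hd), pvSumL_bump f d p.2 (g p.1) hd]
    ring

theorem pvNodup_word (g : Int → Int) :
    ∀ (ps : List (Int × Char)) (d : PySem.Dict Char Int), d.keys.Nodup →
      ((ps.foldl (fun d p => d.insert p.2 (d.getD p.2 0 + g p.1)) d)).keys.Nodup := by
  intro ps
  induction ps with
  | nil => intro d hd; exact hd
  | cons p t ih => intro d hd; exact ih _ (PySem.Dict.nodup_keys_insert d _ _ hd)

theorem pvNodup_weightB (words : List String) : (pvWeightB words).keys.Nodup := by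
  unfold pvWeightB
  generalize hgen : PySem.Dict.empty = d0
  have hd0 : d0.keys.Nodup := hgen ▸ PySem.Dict.nodup_keys_empty
  clear hgen
  induction words generalizing d0 with
  | nil => exact hd0
  | cons w t ih => exact ih _ (pvNodup_word _ _ _ hd0)

theorem pvSumL_weightB (f : Char → Int) (words : List String) :
    pvSumL f (pvWeightB words).items
      = (words.map (fun w =>
          ((PySem.List.enumerate w.toList).map
            (fun p => f p.2 * pvPow w.toList.length p.1)).sum)).sum := by
  unfold pvWeightB
  have main : ∀ (ws : List String) (d : PySem.Dict Char Int), d.keys.Nodup →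
      pvSumL f ((ws.foldl (fun d w =>
        (PySem.List.enumerate w.toList).foldl
          (fun d p => d.insert p.2 (d.getD p.2 0 + pvPow w.toList.length p.1)) d) d).items)
      = pvSumL f d.items + (ws.map (fun w =>
          ((PySem.List.enumerate w.toList).map
            (fun p => f p.2 * pvPow w.toList.length p.1)).sum)).sum := by
    intro ws
    induction ws with
    | nil => intro d _; simp
    | cons w t ih =>
      intro d hd
      simp only [List.foldl_cons, List.map_cons, List.sum_cons]
      rw [ih _ (pvNodup_word _ _ _ hd), pvSumL_word f _ _ _ hd]
      ring
  rw [main words PySem.Dict.empty PySem.Dict.nodup_keys_empty]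
  have h0 : pvSumL f PySem.Dict.empty.items = 0 := rfl
  rw [h0, zero_add]

-- the two weight builds coincide ('+=' with a contains test vs get(ch, 0) + v)
theorem pvWeight_eq (words : List String) : pvWeightA words = pvWeightB words := by
  unfold pvWeightA pvWeightB
  apply List.foldl_ext
  intro d w _
  apply List.foldl_ext
  intro d p _
  split_ifs with h
  · rfl
  · rw [PySem.Dict.getD_of_not_contains d 0 (by simpa using h), zero_add]

-- the digit-assignment dict never revisits keys already consumed
theorem pvAssign_get?_of_not_mem :
    ∀ (l : List (Char × Int)) (m : PySem.Dict Char Int) (a : Int) (c : Char),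
      (∀ q ∈ l, q.1 ≠ c) → (pvAssign l m a).get? c = m.get? c := by
  intro l
  induction l with
  | nil => intro m a c _; rfl
  | cons p t ih =>
    intro m a c h
    simp only [pvAssign]
    rw [ih _ _ _ (fun q hq => h q (List.mem_cons_of_mem p hq)),
        PySem.Dict.get?_insert_of_ne m a (Ne.symm (h p (List.mem_cons_self)))]

-- looking the assigned digits back up over the same list gives the enumerate sum
theorem pvAssign_sum :
    ∀ (l : List (Char × Int)) (m : PySem.Dict Char Int) (a s : Int),
      (l.map (·.1)).Nodup →
      pvSumL (fun c => (pvAssign l m a).getD c 0) l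
        = ((PySem.List.enumerate l s).map (fun q => (a + s - q.1) * q.2.2)).sum := by
  intro l
  induction l with
  | nil => intro m a s _; simp [pvSumL, PySem.List.enumerate]
  | cons p t ih =>
    intro m a s hnd
    simp only [List.map_cons, List.nodup_cons] at hnd
    obtain ⟨hp, hnt⟩ := hnd
    have hhead : (pvAssign t (m.insert p.1 a) (a - 1)).get? p.1 = some a := by
      rw [pvAssign_get?_of_not_mem t _ _ _
            (fun q hq h => hp (List.mem_map.mpr ⟨q, hq, h⟩)),
          PySem.Dict.get?_insert_self]
    have hfun : (fun (q : Int × (Char × Int)) => (a - 1 + (s + 1) - q.1) * q.2.2)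
        = (fun q => (a + s - q.1) * q.2.2) := by
      funext q; ring
    simp only [pvAssign, PySem.List.enumerate_cons, List.map_cons, List.sum_cons, pvSumL_cons]
    rw [PySem.Dict.getD_eq_get?_getD, hhead, ih (m.insert p.1 a) (a - 1) (s + 1) hnt, hfun]
    show ((a:Int)) * p.2 + _ = (a + s - s) * p.2 + _
    ring

-- ===== VERDICT (by name: the statement is the Claim_ definition above) =====
theorem max_word_sum_spec : Claim_equal_max_word_sum := by
  unfold Claim_equal_max_word_sum
  intro words _
  unfold Spec_max_word_sum max_word_sum max_word_sum_alt
  rw [pvWeight_eq]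
  simp only [PySem.List.foldl_add, zero_add]
  have hperm := PySem.List.sorted_perm (pvWeightB words).items (fun x => -x.2) false
  have hknd : ((pvWeightB words).items.map (·.1)).Nodup := by
    simpa only [PySem.Dict.keys] using pvNodup_weightB words
  have hswnd : ((PySem.List.sorted (pvWeightB words).items (fun x => -x.2) false).map (·.1)).Nodup :=
    (List.Perm.nodup_iff (hperm.map _)).mpr hknd
  have h3 := pvAssign_sum (PySem.List.sorted (pvWeightB words).items (fun x => -x.2) false)
    PySem.Dict.empty 9 0 hswnd
  have hfun : (fun (q : Int × (Char × Int)) => ((9 : Int) + 0 - q.1) * q.2.2)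
      = (fun q => (9 - q.1) * q.2.2) := by
    funext q; ring
  rw [hfun] at h3
  have h1 := pvSumL_weightB
    (fun c => (pvAssign (PySem.List.sorted (pvWeightB words).items (fun x => -x.2) false)
      PySem.Dict.empty 9).getD c 0) words
  have h2 := pvSumL_perm
    (fun c => (pvAssign (PySem.List.sorted (pvWeightB words).items (fun x => -x.2) false)
      PySem.Dict.empty 9).getD c 0) hperm.symm
  exact (h1.symm.trans h2).trans h3
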